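-- pv_equiv track=rewrite | github.com/vgreg/earnings_news_jar | TRTH/Quotes/ExtractQuotesAroundEarnings.py | qualif_is_regular_quote
-- ===== SOURCE A (Python) =====
-- def qualif_is_regular_quote(x):
--     for c in [a.strip() for a in x.split(';')]:
--         if c.endswith('[PRC_QL_CD]'):
--             if 'R' == c[:-11].strip():
--                 return True
--         elif c.endswith('[PRC_QL3]'):
--             if 'R' == c[:-9].strip():
--                 return True
--     return False
-- ===== SOURCE B (Python) =====
-- def qualif_is_regular_quote(x):
--     # Single left-to-right pass: a state machine over the characters recognises a
--     # ';'-delimited field of the shape  ws* 'R' ws* ('[PRC_QL_CD]' | '[PRC_QL3]') ws*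
--     # without building any intermediate lists or stripped copies.
--     # States: 0 leading ws / start, 1 after 'R', 2..8 progress in '[PRC_QL',
--     # 9..11 progress in '_CD]', 12 after '[PRC_QL3', 13 full match (trailing ws), 14 dead.
--     state = 0
--     for ch in x:
--         if ch == ';':
--             if state == 13:
--                 return True
--             state = 0
--         elif state == 0:
--             state = 0 if ch.isspace() else 1 if ch == 'R' else 14
--         elif state == 1:
--             state = 1 if ch.isspace() else 2 if ch == '[' else 14
--         elif state == 2:
--             state = 3 if ch == 'P' else 14
--         elif state == 3:
--             state = 4 if ch == 'R' else 14
--         elif state == 4: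
--             state = 5 if ch == 'C' else 14
--         elif state == 5:
--             state = 6 if ch == '_' else 14
--         elif state == 6:
--             state = 7 if ch == 'Q' else 14
--         elif state == 7:
--             state = 8 if ch == 'L' else 14
--         elif state == 8:
--             state = 9 if ch == '_' else 12 if ch == '3' else 14
--         elif state == 9:
--             state = 10 if ch == 'C' else 14
--         elif state == 10:
--             state = 11 if ch == 'D' else 14
--         elif state == 11:
--             state = 13 if ch == ']' else 14
--         elif state == 12:
--             state = 13 if ch == ']' else 14
--         elif state == 13:
--             state = 13 if ch.isspace() else 14
--     return state == 13
-- ===== Notes on version B (the rewrite author's own statement) =====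
-- stated objective: alternative
-- what changed: A splits the string at semicolons, strips each token and tests each token with endswith/slice/strip; B makes a single left-to-right pass over the characters with an explicit finite state machine and builds no intermediate lists.
import Mathlib
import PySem

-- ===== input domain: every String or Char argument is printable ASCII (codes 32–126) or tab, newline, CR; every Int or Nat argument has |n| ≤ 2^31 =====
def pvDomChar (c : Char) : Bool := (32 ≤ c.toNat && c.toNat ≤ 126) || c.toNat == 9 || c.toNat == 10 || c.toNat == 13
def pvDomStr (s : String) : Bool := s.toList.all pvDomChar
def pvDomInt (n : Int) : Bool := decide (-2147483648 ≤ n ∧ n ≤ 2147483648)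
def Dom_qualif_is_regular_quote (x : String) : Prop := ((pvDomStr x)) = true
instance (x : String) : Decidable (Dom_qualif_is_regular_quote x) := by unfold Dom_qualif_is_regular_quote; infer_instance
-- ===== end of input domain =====

-- B replaces A's split/strip/endswith token scan by a single-pass character state machine (alternative decomposition, no intermediate lists).

-- ===== PORT A =====
-- the loop "for c in [a.strip() for a in x.split(';')]" with its early returns
def pvQualLoop : List (List Char) → Bool
  | [] => false
  | c :: rest =>
    if PySem.Chars.endswith c "[PRC_QL_CD]".toList then
      (if PySem.Chars.strip (PySem.List.slice c none (some (-11))) = "R".toList then true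
       else pvQualLoop rest)
    else if PySem.Chars.endswith c "[PRC_QL3]".toList then
      (if PySem.Chars.strip (PySem.List.slice c none (some (-9))) = "R".toList then true
       else pvQualLoop rest)
    else pvQualLoop rest

def qualif_is_regular_quote (x : String) : Bool :=
  pvQualLoop ((PySem.Chars.splitOn x.toList [';']).map PySem.Chars.strip)

-- ===== PORT B =====
-- one step of the state machine (the elif chain of Source B; 14 = dead until the next ';')
def pvStep (st : Int) (ch : Char) : Int :=
  if st = 0 then (if PySem.Chars.isspace ch then 0 else if ch = 'R' then 1 else 14)
  else if st = 1 then (if PySem.Chars.isspace ch then 1 else if ch = '[' then 2 else 14)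
  else if st = 2 then (if ch = 'P' then 3 else 14)
  else if st = 3 then (if ch = 'R' then 4 else 14)
  else if st = 4 then (if ch = 'C' then 5 else 14)
  else if st = 5 then (if ch = '_' then 6 else 14)
  else if st = 6 then (if ch = 'Q' then 7 else 14)
  else if st = 7 then (if ch = 'L' then 8 else 14)
  else if st = 8 then (if ch = '_' then 9 else if ch = '3' then 12 else 14)
  else if st = 9 then (if ch = 'C' then 10 else 14)
  else if st = 10 then (if ch = 'D' then 11 else 14)
  else if st = 11 then (if ch = ']' then 13 else 14)
  else if st = 12 then (if ch = ']' then 13 else 14)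
  else if st = 13 then (if PySem.Chars.isspace ch then 13 else 14)
  else st

-- the loop "for ch in x" with its early return at ';' and the final "return state == 13"
def pvBLoop (st : Int) : List Char → Bool
  | [] => st == 13
  | ch :: rest =>
    if ch = ';' then (if st == 13 then true else pvBLoop 0 rest)
    else pvBLoop (pvStep st ch) rest

def qualif_is_regular_quote_alt (x : String) : Bool := pvBLoop 0 x.toList

-- ===== PRECONDITION & SPEC =====
def Spec_qualif_is_regular_quote (x : String) (out : Bool) : Prop := out = qualif_is_regular_quote_alt x
instance (x : String) (out : Bool) : Decidable (Spec_qualif_is_regular_quote x out) := by unfold Spec_qualif_is_regular_quote; infer_instance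

-- ===== CLAIM (what is proved, stated in full; the proofs are below) =====
def Claim_equal_qualif_is_regular_quote : Prop := ∀ (x : String), Dom_qualif_is_regular_quote x → Spec_qualif_is_regular_quote x (qualif_is_regular_quote x)

-- ===== LEMMAS AND PROOFS =====

-- structural spec of Python's str.split(';') on char lists
def pvSegs : List Char → List (List Char)
  | [] => [[]]
  | c :: rest => if c = ';' then [] :: pvSegs rest else (pvSegs rest).modifyHead (c :: ·)

lemma pvSegs_ne_nil (l : List Char) : pvSegs l ≠ [] := by
  induction l with
  | nil => simp [pvSegs]
  | cons c rest ih =>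
    simp only [pvSegs]
    split
    · simp
    · cases h : pvSegs rest with
      | nil => exact absurd h ih
      | cons s ss => simp [List.modifyHead]

lemma pvSplitOn_go_eq (fuel : Nat) : ∀ (l cur : List Char) (acc : List (List Char)), l.length < fuel →
    PySem.Chars.splitOn.go [';'] fuel l cur acc
      = acc.reverse ++ (pvSegs l).modifyHead (cur.reverse ++ ·) := by
  induction fuel with
  | zero => intro l cur acc h; omega
  | succ f ih =>
    intro l cur acc h
    cases l with
    | nil => simp [PySem.Chars.splitOn.go, pvSegs]
    | cons c rest =>
      by_cases hc : c = ';'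
      · subst hc
        rw [PySem.Chars.splitOn.go]
        have hp : List.isPrefixOf [';'] (';' :: rest) = true := by simp [List.isPrefixOf]
        rw [if_pos hp]
        rw [ih _ _ _ (by simp at h ⊢; omega)]
        obtain ⟨s, ss, hs⟩ := List.exists_cons_of_ne_nil (pvSegs_ne_nil rest)
        simp [pvSegs, List.modifyHead, hs]
      · rw [PySem.Chars.splitOn.go]
        have hp : List.isPrefixOf [';'] (c :: rest) = false := by
          simp [List.isPrefixOf]; exact fun h => absurd h.symm hc
        rw [if_neg (by simp [hp])]
        rw [ih _ _ _ (by simp at h ⊢; omega)]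
        obtain ⟨s, ss, hs⟩ := List.exists_cons_of_ne_nil (pvSegs_ne_nil rest)
        simp [pvSegs, List.modifyHead, hs, hc]

lemma pvSplitOn_eq (cs : List Char) : PySem.Chars.splitOn cs [';'] = pvSegs cs := by
  unfold PySem.Chars.splitOn
  rw [pvSplitOn_go_eq _ _ _ _ (by omega)]
  obtain ⟨s, ss, hs⟩ := List.exists_cons_of_ne_nil (pvSegs_ne_nil cs)
  simp [hs, List.modifyHead]

def pvWsL (l : List Char) : Prop := ∀ c ∈ l, PySem.Chars.isspace c = true

def pvMid (p t : List Char) : Prop := ∃ u v, pvWsL u ∧ pvWsL v ∧ p = u ++ 'R' :: (v ++ t)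

def pvCD : List Char := ['[', 'P', 'R', 'C', '_', 'Q', 'L', '_', 'C', 'D', ']']
def pvQ3 : List Char := ['[', 'P', 'R', 'C', '_', 'Q', 'L', '3', ']']

def pvS13 (p : List Char) : Prop := ∃ q w, pvWsL w ∧ (pvMid q pvCD ∨ pvMid q pvQ3) ∧ p = q ++ w

def pvDelta (p : List Char) : Int := p.foldl pvStep 0

def pvInv (s : Int) (p : List Char) : Prop :=
  (s = 0 → pvWsL p) ∧ (s = 1 → pvMid p []) ∧ (s = 2 → pvMid p ['[']) ∧ (s = 3 → pvMid p ['[', 'P']) ∧ (s = 4 → pvMid p ['[', 'P', 'R']) ∧ (s = 5 → pvMid p ['[', 'P', 'R', 'C']) ∧ (s = 6 → pvMid p ['[', 'P', 'R', 'C', '_']) ∧ (s = 7 → pvMid p ['[', 'P', 'R', 'C', '_', 'Q']) ∧ (s = 8 → pvMid p ['[', 'P', 'R', 'C', '_', 'Q', 'L']) ∧ (s = 9 → pvMid p ['[', 'P', 'R', 'C', '_', 'Q', 'L', '_']) ∧ (s = 10 → pvMid p ['[', 'P', 'R', 'C', '_', 'Q', 'L', '_', 'C']) ∧ (s = 11 →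 pvMid p ['[', 'P', 'R', 'C', '_', 'Q', 'L', '_', 'C', 'D']) ∧ (s = 12 → pvMid p ['[', 'P', 'R', 'C', '_', 'Q', 'L', '3']) ∧ (s = 13 → pvS13 p)

lemma pvInv_mk0 {p : List Char} (h : pvWsL p) : pvInv (0 : Int) p := by
  unfold pvInv
  refine ⟨?_, ?_, ?_, ?_, ?_, ?_, ?_, ?_, ?_, ?_, ?_, ?_, ?_, ?_⟩ <;> intro hk <;> first | exact h | (exfalso; norm_num at hk)

lemma pvInv_mk1 {p : List Char} (h : pvMid p []) : pvInv (1 : Int) p := by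
  unfold pvInv
  refine ⟨?_, ?_, ?_, ?_, ?_, ?_, ?_, ?_, ?_, ?_, ?_, ?_, ?_, ?_⟩ <;> intro hk <;> first | exact h | (exfalso; norm_num at hk)

lemma pvInv_mk2 {p : List Char} (h : pvMid p ['[']) : pvInv (2 : Int) p := by
  unfold pvInv
  refine ⟨?_, ?_, ?_, ?_, ?_, ?_, ?_, ?_, ?_, ?_, ?_, ?_, ?_, ?_⟩ <;> intro hk <;> first | exact h | (exfalso; norm_num at hk)

lemma pvInv_mk3 {p : List Char} (h : pvMid p ['[', 'P']) : pvInv (3 : Int) p := by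
  unfold pvInv
  refine ⟨?_, ?_, ?_, ?_, ?_, ?_, ?_, ?_, ?_, ?_, ?_, ?_, ?_, ?_⟩ <;> intro hk <;> first | exact h | (exfalso; norm_num at hk)

lemma pvInv_mk4 {p : List Char} (h : pvMid p ['[', 'P', 'R']) : pvInv (4 : Int) p := by
  unfold pvInv
  refine ⟨?_, ?_, ?_, ?_, ?_, ?_, ?_, ?_, ?_, ?_, ?_, ?_, ?_, ?_⟩ <;> intro hk <;> first | exact h | (exfalso; norm_num at hk)

lemma pvInv_mk5 {p : List Char} (h : pvMid p ['[', 'P', 'R', 'C']) : pvInv (5 : Int) p := by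
  unfold pvInv
  refine ⟨?_, ?_, ?_, ?_, ?_, ?_, ?_, ?_, ?_, ?_, ?_, ?_, ?_, ?_⟩ <;> intro hk <;> first | exact h | (exfalso; norm_num at hk)

lemma pvInv_mk6 {p : List Char} (h : pvMid p ['[', 'P', 'R', 'C', '_']) : pvInv (6 : Int) p := by
  unfold pvInv
  refine ⟨?_, ?_, ?_, ?_, ?_, ?_, ?_, ?_, ?_, ?_, ?_, ?_, ?_, ?_⟩ <;> intro hk <;> first | exact h | (exfalso; norm_num at hk)

lemma pvInv_mk7 {p : List Char} (h : pvMid p ['[', 'P', 'R', 'C', '_', 'Q']) : pvInv (7 : Int) p := by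
  unfold pvInv
  refine ⟨?_, ?_, ?_, ?_, ?_, ?_, ?_, ?_, ?_, ?_, ?_, ?_, ?_, ?_⟩ <;> intro hk <;> first | exact h | (exfalso; norm_num at hk)

lemma pvInv_mk8 {p : List Char} (h : pvMid p ['[', 'P', 'R', 'C', '_', 'Q', 'L']) : pvInv (8 : Int) p := by
  unfold pvInv
  refine ⟨?_, ?_, ?_, ?_, ?_, ?_, ?_, ?_, ?_, ?_, ?_, ?_, ?_, ?_⟩ <;> intro hk <;> first | exact h | (exfalso; norm_num at hk)

lemma pvInv_mk9 {p : List Char} (h : pvMid p ['[', 'P', 'R', 'C', '_', 'Q', 'L', '_']) : pvInv (9 : Int) p := by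
  unfold pvInv
  refine ⟨?_, ?_, ?_, ?_, ?_, ?_, ?_, ?_, ?_, ?_, ?_, ?_, ?_, ?_⟩ <;> intro hk <;> first | exact h | (exfalso; norm_num at hk)

lemma pvInv_mk10 {p : List Char} (h : pvMid p ['[', 'P', 'R', 'C', '_', 'Q', 'L', '_', 'C']) : pvInv (10 : Int) p := by
  unfold pvInv
  refine ⟨?_, ?_, ?_, ?_, ?_, ?_, ?_, ?_, ?_, ?_, ?_, ?_, ?_, ?_⟩ <;> intro hk <;> first | exact h | (exfalso; norm_num at hk)

lemma pvInv_mk11 {p : List Char} (h : pvMid p ['[', 'P', 'R', 'C', '_', 'Q', 'L', '_', 'C', 'D']) : pvInv (11 : Int) p := by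
  unfold pvInv
  refine ⟨?_, ?_, ?_, ?_, ?_, ?_, ?_, ?_, ?_, ?_, ?_, ?_, ?_, ?_⟩ <;> intro hk <;> first | exact h | (exfalso; norm_num at hk)

lemma pvInv_mk12 {p : List Char} (h : pvMid p ['[', 'P', 'R', 'C', '_', 'Q', 'L', '3']) : pvInv (12 : Int) p := by
  unfold pvInv
  refine ⟨?_, ?_, ?_, ?_, ?_, ?_, ?_, ?_, ?_, ?_, ?_, ?_, ?_, ?_⟩ <;> intro hk <;> first | exact h | (exfalso; norm_num at hk)

lemma pvInv_mk13 {p : List Char} (h : pvS13 p) : pvInv (13 : Int) p := by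
  unfold pvInv
  refine ⟨?_, ?_, ?_, ?_, ?_, ?_, ?_, ?_, ?_, ?_, ?_, ?_, ?_, ?_⟩ <;> intro hk <;> first | exact h | (exfalso; norm_num at hk)

lemma pvInv_dead (p : List Char) : pvInv (14 : Int) p := by
  unfold pvInv
  refine ⟨?_, ?_, ?_, ?_, ?_, ?_, ?_, ?_, ?_, ?_, ?_, ?_, ?_, ?_⟩ <;> intro hk <;> (exfalso; norm_num at hk)

lemma pvWsL_nil : pvWsL [] := by simp [pvWsL]

lemma pvWsL_snoc {p : List Char} {c : Char} (h : pvWsL p) (hc : PySem.Chars.isspace c = true) :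
    pvWsL (p ++ [c]) := by
  intro d hd
  rcases List.mem_append.1 hd with hd | hd
  · exact h d hd
  · simp at hd; subst hd; exact hc

lemma pvWsL_append {u v : List Char} (hu : pvWsL u) (hv : pvWsL v) : pvWsL (u ++ v) := by
  intro d hd
  rcases List.mem_append.1 hd with hd | hd
  · exact hu d hd
  · exact hv d hd

lemma pvMid_snoc {p t : List Char} (c : Char) (h : pvMid p t) : pvMid (p ++ [c]) (t ++ [c]) := by
  obtain ⟨u, v, hu, hv, rfl⟩ := h
  exact ⟨u, v, hu, hv, by simp⟩

lemma pvMid_nil_snoc_ws {p : List Char} {c : Char} (h : pvMid p []) (hc : PySem.Chars.isspace c = true) :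
    pvMid (p ++ [c]) [] := by
  obtain ⟨u, v, hu, hv, rfl⟩ := h
  exact ⟨u, v ++ [c], hu, pvWsL_snoc hv hc, by simp⟩

lemma pvMid_of_ws_R {p : List Char} (h : pvWsL p) : pvMid (p ++ ['R']) [] :=
  ⟨p, [], h, pvWsL_nil, by simp⟩

lemma pvS13_of_mid_CD {p : List Char} (h : pvMid p ['[', 'P', 'R', 'C', '_', 'Q', 'L', '_', 'C', 'D']) : pvS13 (p ++ [']']) := by
  refine ⟨p ++ [']'], [], pvWsL_nil, Or.inl ?_, by simp⟩
  exact pvMid_snoc ']' h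

lemma pvS13_of_mid_Q3 {p : List Char} (h : pvMid p ['[', 'P', 'R', 'C', '_', 'Q', 'L', '3']) : pvS13 (p ++ [']']) := by
  refine ⟨p ++ [']'], [], pvWsL_nil, Or.inr ?_, by simp⟩
  exact pvMid_snoc ']' h

lemma pvS13_snoc_ws {p : List Char} {c : Char} (h : pvS13 p) (hc : PySem.Chars.isspace c = true) :
    pvS13 (p ++ [c]) := by
  obtain ⟨q, w, hw, hmid, rfl⟩ := h
  exact ⟨q, w ++ [c], pvWsL_snoc hw hc, hmid, by simp⟩

lemma pvInv_step (s : Int) (p : List Char) (c : Char) (h : pvInv s p) : pvInv (pvStep s c) (p ++ [c]) := by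
  obtain ⟨h0, h1, h2, h3, h4, h5, h6, h7, h8, h9, h10, h11, h12, h13⟩ := h
  by_cases hs0 : s = 0
  · subst hs0
    norm_num [pvStep]
    by_cases hsp : PySem.Chars.isspace c = true
    · simp only [hsp, if_true]
      exact pvInv_mk0 (pvWsL_snoc (h0 rfl) hsp)
    · by_cases hcR : c = 'R'
      · subst hcR
        try simp only [hsp, if_false, Bool.false_eq_true, if_true]
        try simp only [if_pos rfl]
        exact pvInv_mk1 (pvMid_of_ws_R (h0 rfl))
      · simp only [hsp, hcR, if_false, Bool.false_eq_true, ite_false]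
        exact pvInv_dead _
  by_cases hs1 : s = 1
  · subst hs1
    norm_num [pvStep]
    by_cases hsp : PySem.Chars.isspace c = true
    · simp only [hsp, if_true]
      exact pvInv_mk1 (pvMid_nil_snoc_ws (h1 rfl) hsp)
    · by_cases hcb : c = '['
      · subst hcb
        try simp only [hsp, if_false, Bool.false_eq_true, ite_false, if_pos rfl]
        exact pvInv_mk2 (pvMid_snoc '[' (h1 rfl))
      · simp only [hsp, hcb, if_false, Bool.false_eq_true, ite_false]
        exact pvInv_dead _
  by_cases hs2 : s = 2
  · subst hs2
    norm_num [pvStep]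
    by_cases hc1 : c = 'P'
    · subst hc1
      try simp only [if_pos rfl]
      exact pvInv_mk3 (pvMid_snoc 'P' (h2 rfl))
    · simp only [hc1, ite_false]
      exact pvInv_dead _
  by_cases hs3 : s = 3
  · subst hs3
    norm_num [pvStep]
    by_cases hc1 : c = 'R'
    · subst hc1
      try simp only [if_pos rfl]
      exact pvInv_mk4 (pvMid_snoc 'R' (h3 rfl))
    · simp only [hc1, ite_false]
      exact pvInv_dead _
  by_cases hs4 : s = 4
  · subst hs4
    norm_num [pvStep]
    by_cases hc1 : c = 'C'
    · subst hc1
      try simp only [if_pos rfl]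
      exact pvInv_mk5 (pvMid_snoc 'C' (h4 rfl))
    · simp only [hc1, ite_false]
      exact pvInv_dead _
  by_cases hs5 : s = 5
  · subst hs5
    norm_num [pvStep]
    by_cases hc1 : c = '_'
    · subst hc1
      try simp only [if_pos rfl]
      exact pvInv_mk6 (pvMid_snoc '_' (h5 rfl))
    · simp only [hc1, ite_false]
      exact pvInv_dead _
  by_cases hs6 : s = 6
  · subst hs6
    norm_num [pvStep]
    by_cases hc1 : c = 'Q'
    · subst hc1
      try simp only [if_pos rfl]
      exact pvInv_mk7 (pvMid_snoc 'Q' (h6 rfl))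
    · simp only [hc1, ite_false]
      exact pvInv_dead _
  by_cases hs7 : s = 7
  · subst hs7
    norm_num [pvStep]
    by_cases hc1 : c = 'L'
    · subst hc1
      try simp only [if_pos rfl]
      exact pvInv_mk8 (pvMid_snoc 'L' (h7 rfl))
    · simp only [hc1, ite_false]
      exact pvInv_dead _
  by_cases hs8 : s = 8
  · subst hs8
    norm_num [pvStep]
    by_cases hc1 : c = '_'
    · subst hc1
      try simp only [if_pos rfl]
      exact pvInv_mk9 (pvMid_snoc '_' (h8 rfl))
    · by_cases hc2 : c = '3'
      · subst hc2
        try simp only [hc1, ite_false, if_pos rfl]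
        exact pvInv_mk12 (pvMid_snoc '3' (h8 rfl))
      · simp only [hc1, hc2, ite_false]
        exact pvInv_dead _
  by_cases hs9 : s = 9
  · subst hs9
    norm_num [pvStep]
    by_cases hc1 : c = 'C'
    · subst hc1
      try simp only [if_pos rfl]
      exact pvInv_mk10 (pvMid_snoc 'C' (h9 rfl))
    · simp only [hc1, ite_false]
      exact pvInv_dead _
  by_cases hs10 : s = 10
  · subst hs10
    norm_num [pvStep]
    by_cases hc1 : c = 'D'
    · subst hc1
      try simp only [if_pos rfl]
      exact pvInv_mk11 (pvMid_snoc 'D' (h10 rfl))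
    · simp only [hc1, ite_false]
      exact pvInv_dead _
  by_cases hs11 : s = 11
  · subst hs11
    norm_num [pvStep]
    by_cases hc1 : c = ']'
    · subst hc1
      try simp only [if_pos rfl]
      exact pvInv_mk13 (pvS13_of_mid_CD (h11 rfl))
    · simp only [hc1, ite_false]
      exact pvInv_dead _
  by_cases hs12 : s = 12
  · subst hs12
    norm_num [pvStep]
    by_cases hc1 : c = ']'
    · subst hc1
      try simp only [if_pos rfl]
      exact pvInv_mk13 (pvS13_of_mid_Q3 (h12 rfl))
    · simp only [hc1, ite_false]
      exact pvInv_dead _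
  by_cases hs13 : s = 13
  · subst hs13
    norm_num [pvStep]
    by_cases hsp : PySem.Chars.isspace c = true
    · simp only [hsp, if_true]
      exact pvInv_mk13 (pvS13_snoc_ws (h13 rfl) hsp)
    · simp only [hsp, if_false, Bool.false_eq_true, ite_false]
      exact pvInv_dead _
  have hstep : pvStep s c = s := by
    try simp only [pvStep, hs0, hs1, hs2, hs3, hs4, hs5, hs6, hs7, hs8, hs9, hs10, hs11, hs12, hs13, if_false, ite_false]
  rw [hstep]
  exact ⟨fun hh => absurd hh hs0, fun hh => absurd hh hs1, fun hh => absurd hh hs2, fun hh => absurd hh hs3, fun hh => absurd hh hs4, fun hh => absurd hh hs5, fun hh => absurd hh hs6, fun hh => absurd hh hs7, fun hh => absurd hh hs8, fun hh => absurd hh hs9, fun hh => absurd hh hs10, fun hh => absurd hh hs11, fun hh => absurd hh hs12, fun hh => absurd hh hs13⟩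

-- strip decomposition and absorption
lemma pvLstrip_ws_prepend (u r : List Char) (hu : pvWsL u) :
    PySem.Chars.lstrip (u ++ r) = PySem.Chars.lstrip r := by
  induction u with
  | nil => simp
  | cons a t ih =>
    have ha : PySem.Chars.isspace a = true := hu a (by simp)
    simp only [List.cons_append, PySem.Chars.lstrip, List.dropWhile_cons, ha, if_true]
    exact ih (fun c hc => hu c (by simp [hc]))

lemma pvWsL_reverse {l : List Char} (h : pvWsL l) : pvWsL l.reverse := by
  intro c hc; exact h c (List.mem_reverse.1 hc)

lemma pvStrip_ws_append (r w : List Char) (hw : pvWsL w) :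
    PySem.Chars.strip (r ++ w) = PySem.Chars.strip r := by
  unfold PySem.Chars.strip PySem.Chars.rstrip PySem.Chars.lstrip
  by_cases hr : List.dropWhile PySem.Chars.isspace r = []
  · have h2 : List.dropWhile PySem.Chars.isspace (r ++ w) = List.dropWhile PySem.Chars.isspace w := by
      rw [List.dropWhile_append, hr]; simp
    have hww : List.dropWhile PySem.Chars.isspace w = [] := by
      rw [List.dropWhile_eq_nil_iff]; intro x hx; exact hw x hx
    simp [h2, hr, hww]
  · have h2 : List.dropWhile PySem.Chars.isspace (r ++ w)
        = List.dropWhile PySem.Chars.isspace r ++ w := by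
      rw [List.dropWhile_append]; simp [hr]
    rw [h2]
    rw [List.reverse_append]
    have := pvLstrip_ws_prepend w.reverse (List.dropWhile PySem.Chars.isspace r).reverse (pvWsL_reverse hw)
    unfold PySem.Chars.lstrip at this
    rw [this]

lemma pvStrip_ws_prepend (u r : List Char) (hu : pvWsL u) :
    PySem.Chars.strip (u ++ r) = PySem.Chars.strip r := by
  unfold PySem.Chars.strip
  rw [pvLstrip_ws_prepend u r hu]

lemma pvStrip_sandwich (u r w : List Char) (hu : pvWsL u) (hw : pvWsL w) :
    PySem.Chars.strip (u ++ r ++ w) = PySem.Chars.strip r := by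
  rw [List.append_assoc, pvStrip_ws_prepend _ _ hu, pvStrip_ws_append _ _ hw]

lemma pvStrip_decomp (p : List Char) :
    ∃ u w, pvWsL u ∧ pvWsL w ∧ p = u ++ PySem.Chars.strip p ++ w := by
  refine ⟨List.takeWhile PySem.Chars.isspace p,
          (List.takeWhile PySem.Chars.isspace (PySem.Chars.lstrip p).reverse).reverse,
          ?_, ?_, ?_⟩
  · intro c hc; exact List.mem_takeWhile_imp hc
  · intro c hc; exact List.mem_takeWhile_imp (List.mem_reverse.1 hc)
  · have h1 : p = List.takeWhile PySem.Chars.isspace p ++ PySem.Chars.lstrip p := by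
      unfold PySem.Chars.lstrip
      rw [List.takeWhile_append_dropWhile]
    have h2 : PySem.Chars.lstrip p
        = PySem.Chars.strip p
          ++ (List.takeWhile PySem.Chars.isspace (PySem.Chars.lstrip p).reverse).reverse := by
      unfold PySem.Chars.strip PySem.Chars.rstrip
      conv_lhs => rw [← List.reverse_reverse (PySem.Chars.lstrip p),
        ← List.takeWhile_append_dropWhile (p := PySem.Chars.isspace)
          (l := (PySem.Chars.lstrip p).reverse)]
      rw [List.reverse_append]
    conv_lhs => rw [h1, h2]
    rw [List.append_assoc]

lemma pvStrip_of_ends (a b : Char) (l : List Char)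
    (ha : PySem.Chars.isspace a = false) (hb : PySem.Chars.isspace b = false) :
    PySem.Chars.strip (a :: (l ++ [b])) = a :: (l ++ [b]) := by
  unfold PySem.Chars.strip PySem.Chars.lstrip PySem.Chars.rstrip
  rw [List.dropWhile_cons_of_neg (by simp [ha])]
  rw [List.reverse_cons, List.reverse_append]
  simp only [List.reverse_singleton, List.cons_append]
  rw [List.dropWhile_cons_of_neg (by simp [hb])]
  simp


lemma pvInv_delta (p : List Char) : pvInv (pvDelta p) p := by
  induction p using List.reverseRecOn with
  | nil => exact pvInv_mk0 pvWsL_nil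
  | append_singleton q c ih =>
    unfold pvDelta at *
    rw [List.foldl_append]
    simpa using pvInv_step _ q c ih

lemma pvFoldl_ws_fix (s : Int) (hs : s = 0 ∨ s = 1 ∨ s = 13) :
    ∀ l : List Char, pvWsL l → l.foldl pvStep s = s := by
  intro l
  induction l with
  | nil => intro _; rfl
  | cons a t ih =>
    intro h
    have ha := h a (by simp)
    have hstep : pvStep s a = s := by
      rcases hs with rfl | rfl | rfl <;> norm_num [pvStep, ha]
    rw [List.foldl_cons, hstep]
    exact ih (fun c hc => h c (by simp [hc]))

lemma pvFold_CD : List.foldl pvStep 1 pvCD = 13 := by decide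

lemma pvFold_Q3 : List.foldl pvStep 1 pvQ3 = 13 := by decide

lemma pvDelta_13_of_S13 (p : List Char) (h : pvS13 p) : pvDelta p = 13 := by
  obtain ⟨q, w, hw, hmid, rfl⟩ := h
  unfold pvDelta
  rw [List.foldl_append]
  rcases hmid with hmid | hmid <;>
  · obtain ⟨u, v, hu, hv, rfl⟩ := hmid
    rw [List.foldl_append, pvFoldl_ws_fix 0 (by norm_num) u hu, List.foldl_cons]
    rw [show pvStep 0 'R' = 1 by decide]
    rw [List.foldl_append, pvFoldl_ws_fix 1 (by norm_num) v hv]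
    first
      | rw [pvFold_CD, pvFoldl_ws_fix 13 (by norm_num) w hw]
      | rw [pvFold_Q3, pvFoldl_ws_fix 13 (by norm_num) w hw]

-- slices of A, on a token of which suf is a suffix
lemma pvSlice_drop_suffix (g suf : List Char) (hlen : 1 < suf.length) :
    PySem.List.slice (g ++ suf) none (some (-(suf.length : Int))) = g := by
  rw [PySem.List.slice_to_neg_natCast _ _ (by omega)]
  simp

lemma pvStrip_mid_eq_R (v : List Char) (hv : pvWsL v) :
    PySem.Chars.strip ('R' :: v) = ['R'] := by
  have := pvStrip_ws_append ['R'] v hv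
  simpa using this

-- A's per-token test holds exactly on the S13 shapes
lemma pvEnds_notCD (v : List Char) (hv : pvWsL v) :
    PySem.Chars.endswith ('R' :: (v ++ pvQ3)) "[PRC_QL_CD]".toList = false := by
  by_cases h : PySem.Chars.endswith ('R' :: (v ++ pvQ3)) "[PRC_QL_CD]".toList = true
  · exfalso
    have hCD : ("[PRC_QL_CD]".toList) <:+ ('R' :: (v ++ pvQ3)) := (PySem.Chars.endswith_iff _ _).1 h
    have hQ3 : pvQ3 <:+ ('R' :: (v ++ pvQ3)) := ⟨'R' :: v, by simp⟩
    have h1 : ("[PRC_QL_CD]".toList).reverse <+: ('R' :: (v ++ pvQ3)).reverse :=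
      List.reverse_prefix.2 hCD
    have h2 : pvQ3.reverse <+: ('R' :: (v ++ pvQ3)).reverse :=
      List.reverse_prefix.2 hQ3
    rcases List.prefix_or_prefix_of_prefix h1 h2 with hp | hp
    · have hle := hp.length_le
      have h9 : pvQ3.length = 9 := by decide
      simp [h9] at hle
    · revert hp
      decide
  · simpa using h

lemma pvTokTest_of_S13 (p : List Char) (h : pvS13 p) : pvQualLoop [PySem.Chars.strip p] = true := by
  obtain ⟨q, w, hw, hmid, rfl⟩ := h
  rcases hmid with ⟨u, v, hu, hv, rfl⟩ | ⟨u, v, hu, hv, rfl⟩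
  · have hsp : PySem.Chars.strip (u ++ 'R' :: (v ++ pvCD) ++ w) = 'R' :: (v ++ pvCD) := by
      rw [pvStrip_sandwich _ _ _ hu hw]
      have hsplit : 'R' :: (v ++ pvCD) = 'R' :: ((v ++ List.dropLast pvCD) ++ [']']) := by
        simp [pvCD]
      rw [hsplit, pvStrip_of_ends _ _ _ (by decide) (by decide), ← hsplit]
    rw [hsp]
    have hend : PySem.Chars.endswith ('R' :: (v ++ pvCD)) "[PRC_QL_CD]".toList = true := by
      rw [PySem.Chars.endswith_iff, show "[PRC_QL_CD]".toList = pvCD from by decide]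
      exact ⟨'R' :: v, by simp⟩
    have hsl : PySem.List.slice ('R' :: (v ++ pvCD)) none (some (-11)) = 'R' :: v := by
      have := pvSlice_drop_suffix ('R' :: v) pvCD (by decide)
      simpa using this
    simp only [pvQualLoop, hend, if_true, hsl]
    rw [if_pos (by rw [pvStrip_mid_eq_R v hv]; decide)]
  · have hsp : PySem.Chars.strip (u ++ 'R' :: (v ++ pvQ3) ++ w) = 'R' :: (v ++ pvQ3) := by
      rw [pvStrip_sandwich _ _ _ hu hw]
      have hsplit : 'R' :: (v ++ pvQ3) = 'R' :: ((v ++ List.dropLast pvQ3) ++ [']']) := by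
        simp [pvQ3]
      rw [hsplit, pvStrip_of_ends _ _ _ (by decide) (by decide), ← hsplit]
    rw [hsp]
    have hend : PySem.Chars.endswith ('R' :: (v ++ pvQ3)) "[PRC_QL3]".toList = true := by
      rw [PySem.Chars.endswith_iff, show "[PRC_QL3]".toList = pvQ3 from by decide]
      exact ⟨'R' :: v, by simp⟩
    have hsl : PySem.List.slice ('R' :: (v ++ pvQ3)) none (some (-9)) = 'R' :: v := by
      have := pvSlice_drop_suffix ('R' :: v) pvQ3 (by decide)
      simpa using this
    simp only [pvQualLoop, pvEnds_notCD v hv, Bool.false_eq_true, if_false, hend, if_true, hsl]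
    rw [if_pos (by rw [pvStrip_mid_eq_R v hv]; decide)]

lemma pvTokTest_iff (p : List Char) : pvQualLoop [PySem.Chars.strip p] = true ↔ pvS13 p := by
  constructor
  · intro h
    obtain ⟨U, W, hU, hW, hp⟩ := pvStrip_decomp p
    simp only [pvQualLoop] at h
    split_ifs at h with h1 h2 h3 h4
    · obtain ⟨g, hg⟩ := (PySem.Chars.endswith_iff _ _).1 h1
      rw [show "[PRC_QL_CD]".toList = pvCD from by decide] at hg
      have hsl : PySem.List.slice (PySem.Chars.strip p) none (some (-11)) = g := by
        rw [← hg]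
        have := pvSlice_drop_suffix g pvCD (by decide)
        simpa using this
      rw [hsl] at h2
      obtain ⟨u1, w1, hu1, hw1, hgd⟩ := pvStrip_decomp g
      rw [h2] at hgd
      refine ⟨U ++ (u1 ++ 'R' :: (w1 ++ pvCD)), W, hW,
        Or.inl ⟨U ++ u1, w1, pvWsL_append hU hu1, hw1, by simp⟩, ?_⟩
      rw [hp, ← hg, hgd]
      simp [show "R".toList = ['R'] from by decide]
    · obtain ⟨g, hg⟩ := (PySem.Chars.endswith_iff _ _).1 h3
      rw [show "[PRC_QL3]".toList = pvQ3 from by decide] at hg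
      have hsl : PySem.List.slice (PySem.Chars.strip p) none (some (-9)) = g := by
        rw [← hg]
        have := pvSlice_drop_suffix g pvQ3 (by decide)
        simpa using this
      rw [hsl] at h4
      obtain ⟨u1, w1, hu1, hw1, hgd⟩ := pvStrip_decomp g
      rw [h4] at hgd
      refine ⟨U ++ (u1 ++ 'R' :: (w1 ++ pvQ3)), W, hW,
        Or.inr ⟨U ++ u1, w1, pvWsL_append hU hu1, hw1, by simp⟩, ?_⟩
      rw [hp, ← hg, hgd]
      simp [show "R".toList = ['R'] from by decide]
  · exact pvTokTest_of_S13 p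

lemma pvQualLoop_cons (t : List Char) (ts : List (List Char)) :
    pvQualLoop (t :: ts) = (pvQualLoop [t] || pvQualLoop ts) := by
  simp only [pvQualLoop]
  split_ifs <;> simp

lemma pvSeg (p : List Char) : (pvDelta p == 13) = pvQualLoop [PySem.Chars.strip p] := by
  by_cases hd : pvDelta p = 13
  · have hS : pvS13 p := by
      have hinv := pvInv_delta p
      exact hinv.2.2.2.2.2.2.2.2.2.2.2.2.2 hd
    rw [hd]
    exact ((pvTokTest_iff p).2 hS).symm
  · have hne : pvQualLoop [PySem.Chars.strip p] = false := by
      cases hq : pvQualLoop [PySem.Chars.strip p]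
      · rfl
      · exact absurd (pvDelta_13_of_S13 p ((pvTokTest_iff p).1 hq)) hd
    rw [hne]
    simp [hd]


lemma pvModifyHead_nil (l : List (List Char)) : l.modifyHead (fun t => [] ++ t) = l := by
  cases l <;> simp

lemma pvMain (cs : List Char) : ∀ p : List Char,
    pvBLoop (pvDelta p) cs
      = pvQualLoop (((pvSegs cs).modifyHead (p ++ ·)).map PySem.Chars.strip) := by
  induction cs with
  | nil =>
    intro p
    simp only [pvBLoop, pvSegs, List.modifyHead, List.map]
    rw [pvSeg]
    simp
  | cons c rest ih =>
    intro p
    by_cases hc : c = ';'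
    · subst hc
      have hL : pvBLoop (pvDelta p) (';' :: rest)
          = (if pvDelta p == 13 then true else pvBLoop 0 rest) := by
        simp [pvBLoop]
      have hR : ((pvSegs (';' :: rest)).modifyHead (p ++ ·)).map PySem.Chars.strip
          = PySem.Chars.strip (p ++ []) :: (pvSegs rest).map PySem.Chars.strip := by
        simp [pvSegs, List.modifyHead]
      rw [hL, hR, pvQualLoop_cons]
      simp only [List.append_nil]
      rw [pvSeg]
      cases htok : pvQualLoop [PySem.Chars.strip p]
      · simp only [Bool.false_eq_true, if_false, Bool.false_or]
        have h0 := ih []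
        simp only [pvDelta, List.foldl_nil, pvModifyHead_nil] at h0
        exact h0
      · simp
    · have hL : pvBLoop (pvDelta p) (c :: rest) = pvBLoop (pvStep (pvDelta p) c) rest := by
        simp [pvBLoop, hc]
      have hdel : pvStep (pvDelta p) c = pvDelta (p ++ [c]) := by
        unfold pvDelta; rw [List.foldl_append]; rfl
      rw [hL, hdel, ih (p ++ [c])]
      have hR : (pvSegs (c :: rest)).modifyHead (p ++ ·)
          = (pvSegs rest).modifyHead ((p ++ [c]) ++ ·) := by
        simp only [pvSegs, hc, ite_false, List.modifyHead_modifyHead]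
        have hfun : ((fun x => p ++ x) ∘ fun x => c :: x) = (fun x => (p ++ [c]) ++ x) := by
          funext t; simp
        rw [hfun]
      rw [hR]

-- ===== VERDICT (by name: the statement is the Claim_ definition above) =====
theorem qualif_is_regular_quote_spec : Claim_equal_qualif_is_regular_quote := by
  intro x _
  unfold Spec_qualif_is_regular_quote qualif_is_regular_quote qualif_is_regular_quote_alt
  rw [pvSplitOn_eq]
  have h := pvMain x.toList []
  simp only [pvDelta, List.foldl_nil, pvModifyHead_nil] at h
  rw [h]
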